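-- pv_equiv track=rewrite | github.com/prography-6th-study/algorithm-code | yeji/3-예산.py | solution
-- ===== SOURCE A (Python) =====
-- def solution(budgets, M):
--     if (sum(budgets) <= M):
--         return max(budgets)
--
--     answer = 0
--     upperLimit = 0
--     maxLimit = max(budgets)
--
--     while (upperLimit <= maxLimit):
--         result = 0
--         average = (upperLimit+maxLimit)//2
--         for b in budgets:
--             if average >= b:
--                 result += b
--             else:
--                 result += average
--         if result > M:
--             maxLimit = average-1
--         else:
--             answer = average
--             upperLimit = average+1
--     return answer
-- ===== SOURCE B (Python) =====
-- def solution(budgets, M):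
--     # Sort + prefix-sum scan: the cap falls in the gap where the closed-form
--     # candidate drops below the next budget.
--     if sum(budgets) <= M:
--         return max(budgets)
--     bs = sorted(budgets)
--     n = len(bs)
--     pref = 0
--     for i, b in enumerate(bs):
--         c = (M - pref) // (n - i)
--         if c < b:
--             return max(c, 0)
--         pref += b
-- ===== Notes on version B (the rewrite author's own statement) =====
-- stated objective: alternative
-- what changed: Replaced A's binary search over candidate caps (recomputing the capped sum for every probe) by a single sort + prefix-sum scan that locates the gap the cap falls into and computes it in closed form by one floor division.
-- outside the precondition, e.g. on solution([], 5): A raises ValueError, B raises ValueError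
import Mathlib
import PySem

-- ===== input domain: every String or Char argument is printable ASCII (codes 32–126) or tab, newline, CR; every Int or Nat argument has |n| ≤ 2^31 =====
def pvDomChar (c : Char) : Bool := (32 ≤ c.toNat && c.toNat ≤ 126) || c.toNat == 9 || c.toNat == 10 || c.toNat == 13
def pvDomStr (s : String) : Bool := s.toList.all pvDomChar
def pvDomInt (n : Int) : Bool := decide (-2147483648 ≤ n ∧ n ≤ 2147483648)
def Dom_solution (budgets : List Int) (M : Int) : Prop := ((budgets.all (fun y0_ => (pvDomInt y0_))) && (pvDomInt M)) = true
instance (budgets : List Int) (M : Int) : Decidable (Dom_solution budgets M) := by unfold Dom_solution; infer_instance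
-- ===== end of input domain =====

-- B replaces A's binary search over the cap by sorting + one prefix-sum scan that
-- computes the cap in closed form at the gap where it falls (objective: alternative).

-- ===== PORT A =====
-- A's while-loop: state (answer, upperLimit, maxLimit); the inner for-loop is the foldl.
def solutionLoop (budgets : List Int) (M : Int) (answer upperLimit maxLimit : Int) : Int :=
  if h : upperLimit ≤ maxLimit then
    let average := PySem.Int.floordiv (upperLimit + maxLimit) 2
    let result := budgets.foldl (fun r b => r + if average ≥ b then b else average) 0
    if result > M then solutionLoop budgets M answer upperLimit (average - 1)
    else solutionLoop budgets M average (average + 1) maxLimit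
  else answer
termination_by (maxLimit + 1 - upperLimit).toNat
decreasing_by
  · have := PySem.Int.floordiv_two_mid_bounds h
    omega
  · have := PySem.Int.floordiv_two_mid_bounds h
    omega

def solution (budgets : List Int) (M : Int) : Int :=
  if budgets.sum ≤ M then (PySem.List.max? budgets (fun x => x)).getD 0
  else
    let maxLimit := (PySem.List.max? budgets (fun x => x)).getD 0
    solutionLoop budgets M 0 0 maxLimit

-- ===== PORT B =====
-- B's for-loop over the sorted list with the running prefix sum (early return).
def solGo (M : Int) : List Int → Int → Int
  | [], _ => 0   -- never reached when sum budgets > M (the loop always returns first)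
  | b :: rest, pref =>
    let c := PySem.Int.floordiv (M - pref) (rest.length + 1)
    if c < b then max c 0 else solGo M rest (pref + b)

def solution_alt (budgets : List Int) (M : Int) : Int :=
  if budgets.sum ≤ M then (PySem.List.max? budgets (fun x => x)).getD 0
  else solGo M (PySem.List.sorted budgets (fun x => x)) 0

-- ===== PRECONDITION & SPEC =====
-- Pre_ excludes the empty list, on which Python A raises ValueError at max(budgets).
def Pre_solution (budgets : List Int) (M : Int) : Prop := budgets ≠ []
instance (budgets : List Int) (M : Int) : Decidable (Pre_solution budgets M) := by
  unfold Pre_solution; infer_instance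

def pvWitness_solution : List Int × Int := ([1, 3, 2], 4)

def Spec_solution (budgets : List Int) (M : Int) (out : Int) : Prop := out = solution_alt budgets M
instance (budgets : List Int) (M : Int) (out : Int) : Decidable (Spec_solution budgets M out) := by unfold Spec_solution; infer_instance

-- ===== CLAIM (what is proved, stated in full; the proofs are below) =====
def Claim_equal_solution : Prop := ∀ (budgets : List Int) (M : Int), Dom_solution budgets M → Pre_solution budgets M → Spec_solution budgets M (solution budgets M)

-- ===== LEMMAS AND PROOFS =====

-- capped sum Σ min(b, c): the quantity both programs probe
def fsum (budgets : List Int) (c : Int) : Int := (budgets.map (fun b => min b c)).sum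

lemma foldl_step_eq_fsum' (budgets : List Int) (c : Int) : ∀ r : Int,
    budgets.foldl (fun r b => r + if c ≥ b then b else c) r = r + fsum budgets c := by
  induction budgets with
  | nil => intro r; simp [fsum]
  | cons b t ih =>
    intro r
    simp only [List.foldl_cons, ih, fsum, List.map_cons, List.sum_cons]
    have : (if c ≥ b then b else c) = min b c := by
      rcases le_or_gt b c with h | h
      · simp [h]
      · have h2 : ¬ (c ≥ b) := by omega
        simp [h2, min_eq_right (le_of_lt h)]
    omega

lemma fsum_mono (budgets : List Int) {c₁ c₂ : Int} (h : c₁ ≤ c₂) :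
    fsum budgets c₁ ≤ fsum budgets c₂ := by
  induction budgets with
  | nil => simp [fsum]
  | cons b t ih =>
    simp only [fsum, List.map_cons, List.sum_cons] at *
    have : min b c₁ ≤ min b c₂ := by omega
    omega

lemma fsum_perm {xs ys : List Int} (h : xs.Perm ys) (c : Int) : fsum xs c = fsum ys c := by
  unfold fsum; exact List.Perm.sum_eq (h.map _)

lemma fsum_of_le (budgets : List Int) (c : Int) (h : ∀ b ∈ budgets, c ≤ b) :
    fsum budgets c = budgets.length * c := by
  induction budgets with
  | nil => simp [fsum]
  | cons b t ih =>
    have hb := h b (by simp)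
    have := ih (fun x hx => h x (by simp [hx]))
    simp only [fsum, List.map_cons, List.sum_cons, List.length_cons] at *
    rw [min_eq_right hb, this]; push_cast; ring

lemma fsum_of_ge (budgets : List Int) (c : Int) (h : ∀ b ∈ budgets, b ≤ c) :
    fsum budgets c = budgets.sum := by
  induction budgets with
  | nil => simp [fsum]
  | cons b t ih =>
    have hb := h b (by simp)
    have := ih (fun x hx => h x (by simp [hx]))
    simp only [fsum, List.map_cons, List.sum_cons] at *
    rw [min_eq_left hb, this]

lemma fsum_le_len_mul (budgets : List Int) (c : Int) :
    fsum budgets c ≤ budgets.length * c := by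
  induction budgets with
  | nil => simp [fsum]
  | cons b t ih =>
    simp only [fsum, List.map_cons, List.sum_cons, List.length_cons] at *
    have : min b c ≤ c := min_le_right _ _
    have h2 : ((t.length : Int) + 1) * c = t.length * c + c := by ring
    push_cast
    omega

-- the greatest cap whose capped sum stays within M (exists whenever the full sum exceeds M)
lemma exists_greatest (budgets : List Int) (M : Int) (hne : budgets ≠ [])
    (hM : M < budgets.sum) :
    ∃ cstar : Int, ∀ c : Int, fsum budgets c ≤ M ↔ c ≤ cstar := by
  obtain ⟨m, hm⟩ : ∃ m, PySem.List.max? budgets (fun x => x) = some m := by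
    rcases h : PySem.List.max? budgets (fun x => x) with _ | m
    · exact absurd ((PySem.List.max?_eq_none_iff _ _).mp h) hne
    · exact ⟨m, rfl⟩
  have hmax : ∀ y ∈ budgets, y ≤ m := PySem.List.max?_isMax hm
  have hbdd : ∀ z : Int, fsum budgets z ≤ M → z ≤ m := by
    intro z hz
    by_contra hzm
    have : fsum budgets z = budgets.sum := fsum_of_ge _ _ (fun b hb => by
      have := hmax b hb; omega)
    omega
  have hinh : ∃ z : Int, fsum budgets z ≤ M := by
    refine ⟨min M 0, ?_⟩
    have h1 := fsum_le_len_mul budgets (min M 0)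
    have hlen : 1 ≤ (budgets.length : Int) := by
      cases budgets with
      | nil => exact absurd rfl hne
      | cons a t => simp
    nlinarith [min_le_left M 0, min_le_right M 0]
  obtain ⟨lub, hl1, hl2⟩ := Int.exists_greatest_of_bdd ⟨m, hbdd⟩ hinh
  refine ⟨lub, fun c => ⟨hl2 c, fun hc => le_trans (fsum_mono _ hc) hl1⟩⟩

-- A's binary-search loop, characterized by the greatest good cap cstar
lemma solutionLoop_spec (budgets : List Int) (M cstar : Int)
    (hc : ∀ c : Int, fsum budgets c ≤ M ↔ c ≤ cstar) :
    ∀ (n : Nat) (a u m : Int), (m + 1 - u).toNat ≤ n → solutionLoop budgets M a u m =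
      if u ≤ m then (if cstar < u then a else min cstar m) else a := by
  intro n
  induction n with
  | zero =>
    intro a u m hn
    have hum : ¬ u ≤ m := by omega
    rw [solutionLoop]
    simp [hum]
  | succ n ih =>
    intro a u m hn
    rw [solutionLoop]
    by_cases hum : u ≤ m
    · simp only [hum, dif_pos]
      have hmid := PySem.Int.floordiv_two_mid_bounds hum
      rw [foldl_step_eq_fsum']
      by_cases hr : 0 + fsum budgets (PySem.Int.floordiv (u + m) 2) > M
      · have hcs : cstar < PySem.Int.floordiv (u + m) 2 := by
          have := hc (PySem.Int.floordiv (u + m) 2); omega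
        rw [if_pos hr, ih a u (PySem.Int.floordiv (u + m) 2 - 1) (by omega)]
        simp only [min_def]
        split_ifs <;> omega
      · have hcs : PySem.Int.floordiv (u + m) 2 ≤ cstar := by
          have := hc (PySem.Int.floordiv (u + m) 2); omega
        rw [if_neg hr, ih (PySem.Int.floordiv (u + m) 2) (PySem.Int.floordiv (u + m) 2 + 1) m (by omega)]
        simp only [min_def]
        split_ifs <;> omega
    · simp [hum]

-- B's scan over the sorted list, characterized by the same cstar
lemma solGo_spec (M cstar : Int) :
    ∀ (rest : List Int) (pref : Int), rest ≠ [] → rest.Pairwise (· ≤ ·) →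
      M < pref + rest.sum →
      (∀ c : Int, pref + fsum rest c ≤ M → c ≤ cstar) →
      (∀ c : Int, c ≤ cstar → pref + fsum rest c ≤ M) →
      solGo M rest pref = max cstar 0 := by
  intro rest
  induction rest with
  | nil => intro _ h; exact absurd rfl h
  | cons b tail ih =>
    intro pref _ hpw hM hub hlb
    have hb : ∀ x ∈ tail, b ≤ x := by
      intro x hx; exact (List.pairwise_cons.mp hpw).1 x hx
    have hpwt : tail.Pairwise (· ≤ ·) := (List.pairwise_cons.mp hpw).2
    have hk : (0 : Int) < (tail.length : Int) + 1 := by positivity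
    rw [solGo]
    set c0 := PySem.Int.floordiv (M - pref) ((tail.length : Int) + 1) with hc0
    have hfloor : c0 * ((tail.length : Int) + 1) ≤ M - pref :=
      (PySem.Int.le_floordiv_iff_mul_le hk).mp le_rfl
    have hlen : ((b :: tail).length : Int) = (tail.length : Int) + 1 := by
      simp
    by_cases hsplit : c0 < b
    · -- the cap falls below the head: c0 is the greatest good cap
      have h1 : c0 ≤ cstar := by
        apply hub
        rw [fsum_of_le _ _ (by intro x hx; rcases hx with _ | hx
                               · omega
                               · have := hb x (by assumption); omega), hlen]
        rw [mul_comm]; omega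
      have h2 : cstar ≤ c0 := by
        by_contra hcon
        have hle : c0 + 1 ≤ cstar := by omega
        have := hlb (c0 + 1) hle
        rw [fsum_of_le _ _ (by intro x hx; rcases hx with _ | hx
                               · omega
                               · have := hb x (by assumption); omega), hlen] at this
        have hlt : M - pref < (c0 + 1) * ((tail.length : Int) + 1) :=
          (PySem.Int.floordiv_lt_iff_lt_mul hk).mp (by omega)
        nlinarith
      have : c0 = cstar := le_antisymm h1 h2
      rw [if_pos hsplit, this]
    · -- head fully funded: recurse on the tail
      have hbc : b ≤ c0 := by omega
      have hbcs : b ≤ cstar := by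
        apply hub
        rw [fsum_of_le _ _ (by intro x hx; rcases hx with _ | hx
                               · omega
                               · have := hb x (by assumption); omega), hlen]
        nlinarith
      have htail : tail ≠ [] := by
        intro hnil
        subst hnil
        simp at hfloor hM
        omega
      rw [if_neg hsplit]
      apply ih (pref + b) htail hpwt
      · simp at hM ⊢; omega
      · intro c hc
        apply hub
        have : fsum (b :: tail) c = min b c + fsum tail c := by
          simp [fsum]
        have hmin : min b c ≤ b := min_le_left _ _
        omega
      · intro c hc
        by_cases hcb : c ≤ b
        · have hmono := fsum_mono tail hcb
          have := hlb b hbcs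
          have : fsum (b :: tail) b = min b b + fsum tail b := by simp [fsum]
          simp at this
          omega
        · have := hlb c hc
          have heq : fsum (b :: tail) c = min b c + fsum tail c := by simp [fsum]
          rw [min_eq_left (by omega)] at heq
          omega

-- ===== VERDICT (by name: the statement is the Claim_ definition above) =====
theorem solution_spec : Claim_equal_solution := by
  intro budgets M _ hpre
  show solution budgets M = solution_alt budgets M
  unfold solution solution_alt
  by_cases hs : budgets.sum ≤ M
  · simp [hs]
  · simp only [hs, if_false]
    have hM : M < budgets.sum := by omega
    obtain ⟨cstar, hc⟩ := exists_greatest budgets M hpre hM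
    -- A side
    obtain ⟨m, hm⟩ : ∃ m, PySem.List.max? budgets (fun x => x) = some m := by
      rcases h : PySem.List.max? budgets (fun x => x) with _ | m
      · exact absurd ((PySem.List.max?_eq_none_iff _ _).mp h) hpre
      · exact ⟨m, rfl⟩
    have hmax : ∀ y ∈ budgets, y ≤ m := PySem.List.max?_isMax hm
    have hcm : cstar < m := by
      have hfull : fsum budgets m = budgets.sum := fsum_of_ge _ _ hmax
      have := hc m
      omega
    rw [hm]
    have hA := solutionLoop_spec budgets M cstar hc (m + 1 - 0).toNat 0 0 m (by omega)
    -- B side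
    have hperm : (PySem.List.sorted budgets (fun x => x)).Perm budgets :=
      PySem.List.sorted_perm _ _ _
    have hsum : (PySem.List.sorted budgets (fun x => x)).sum = budgets.sum :=
      hperm.sum_eq
    have hsne : PySem.List.sorted budgets (fun x => x) ≠ [] := by
      intro h
      exact hpre ((PySem.List.sorted_eq_nil_iff _ _ _).mp h)
    have hB := solGo_spec M cstar (PySem.List.sorted budgets (fun x => x)) 0 hsne
      (by have := PySem.List.sorted_pairwise (xs := budgets) (key := fun x => x)
          simpa using this)
      (by omega)
      (by intro c hcc
          rw [fsum_perm hperm] at hcc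
          exact (hc c).mp (by omega))
      (by intro c hcc
          rw [fsum_perm hperm]
          have := (hc c).mpr hcc
          omega)
    rw [Option.getD_some, hA, hB]
    simp only [min_def, max_def]
    split_ifs <;> omega
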